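-- pv_equiv track=rewrite | github.com/eloplope/NLP_25 | week1/week1/tok_eval.py | count
-- ===== SOURCE A (Python) =====
-- def text2spans(wordlist):
--     """
--     gets as input a list of strings, and outputs their
--     start/end - character indices as a set. Exampe:
--     input: ['this', 'is', 'a', 'test']
--     output: {(0,4), (4,6), (6,7), (7,11)}
--     """
--     start_idx = 0
--     spans = []
--     for word in wordlist:
--         end_idx = start_idx + len(word)
--         spans.append((start_idx, end_idx))
--         start_idx = end_idx
--     return spans
--
-- def count(gold_tok, pred_tok):
--     gold_spans = text2spans(gold_tok)
--     pred_spans = text2spans(pred_tok)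
--     tp = 0
--     fp = 0
--     fn = 0
--     err_idxs_gold = set()
--     err_idxs_pred = set()
--     for gold_span_idx, gold_span in enumerate(gold_spans):
--         if gold_span in pred_spans:
--             tp += 1
--         else:
--             fn += 1
--             err_idxs_gold.add(gold_span_idx)
--
--     for pred_span_idx, pred_span in enumerate(pred_spans):
--         if pred_span not in gold_spans:
--             fp += 1
--             err_idxs_pred.add(pred_span_idx)
--     return tp, fp, fn, err_idxs_gold, err_idxs_pred
-- ===== SOURCE B (Python) =====
-- def count(gold_tok, pred_tok):
--     def spans(toks):
--         s = 0
--         starts = [0]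
--         for w in toks:
--             s += len(w)
--             starts.append(s)
--         return list(zip(starts, starts[1:]))
--     gs = spans(gold_tok)
--     ps = spans(pred_tok)
--     tp = fp = fn = 0
--     eg = set()
--     ep = set()
--     i = j = 0
--     n, m = len(gs), len(ps)
--     while i < n and j < m:
--         g, p = gs[i], ps[j]
--         if g == p:
--             while i < n and gs[i] == g:
--                 tp += 1
--                 i += 1
--             while j < m and ps[j] == g:
--                 j += 1
--         elif g < p:
--             fn += 1
--             eg.add(i)
--             i += 1
--         else:
--             fp += 1
--             ep.add(j)
--             j += 1
--     while i < n:
--         fn += 1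
--         eg.add(i)
--         i += 1
--     while j < m:
--         fp += 1
--         ep.add(j)
--         j += 1
--     return tp, fp, fn, eg, ep
-- ===== Notes on version B (the rewrite author's own statement) =====
-- stated objective: faster
-- what changed: Replaces the two membership loops (each scanning the other span list) by a single two-pointer merge over the two sorted span lists, consuming runs of equal spans to keep A's membership semantics on duplicate (empty-token) spans.
import Mathlib
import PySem

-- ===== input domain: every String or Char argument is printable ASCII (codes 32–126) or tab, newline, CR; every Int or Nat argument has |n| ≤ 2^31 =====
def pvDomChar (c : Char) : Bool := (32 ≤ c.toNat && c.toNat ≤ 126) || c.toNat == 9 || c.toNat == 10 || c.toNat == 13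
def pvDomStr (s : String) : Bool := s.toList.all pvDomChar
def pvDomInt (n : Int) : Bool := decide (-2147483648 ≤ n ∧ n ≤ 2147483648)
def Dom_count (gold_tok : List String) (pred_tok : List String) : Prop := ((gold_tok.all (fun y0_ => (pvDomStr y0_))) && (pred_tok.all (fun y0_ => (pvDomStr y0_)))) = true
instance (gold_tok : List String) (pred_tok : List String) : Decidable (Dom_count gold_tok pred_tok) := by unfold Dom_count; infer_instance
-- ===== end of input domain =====

-- B replaces A's two membership loops (each scanning the other span list) by one
-- two-pointer merge of the two sorted span lists, consuming runs of equal spans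
-- so duplicate spans from empty tokens keep A's membership semantics (objective: faster).

-- ===== PORT A =====
def text2spans (wordlist : List String) : List (Int × Int) :=
  (wordlist.foldl
    (fun (st : Int × List (Int × Int)) word =>
      (st.1 + PySem.Str.len word, st.2 ++ [(st.1, st.1 + PySem.Str.len word)]))
    (0, [])).2

def count (gold_tok : List String) (pred_tok : List String) : Int × Int × Int × List Int × List Int :=
  let gold_spans := text2spans gold_tok
  let pred_spans := text2spans pred_tok
  let r1 := (PySem.List.enumerate gold_spans).foldl
    (fun (st : Int × Int × PySem.Set Int) gp =>
      if gp.2 ∈ pred_spans then (st.1 + 1, st.2.1, st.2.2)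
      else (st.1, st.2.1 + 1, PySem.Set.add st.2.2 gp.1))
    (0, 0, PySem.Set.empty)
  let r2 := (PySem.List.enumerate pred_spans).foldl
    (fun (st : Int × PySem.Set Int) pp =>
      if pp.2 ∉ gold_spans then (st.1 + 1, PySem.Set.add st.2 pp.1)
      else st)
    (0, PySem.Set.empty)
  (r1.1, r2.1, r1.2.1, r1.2.2, r2.2)

-- ===== PORT B =====
-- Python tuple comparison g < p on int pairs (lexicographic)
def pvLtB (a b : Int × Int) : Bool := a.1 < b.1 || (a.1 == b.1 && a.2 < b.2)

-- Source B's spans: prefix sums, then zip(starts, starts[1:]); starts[1:] is PySem.List.slice starts (some 1) none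
def spans_alt (toks : List String) : List (Int × Int) :=
  let r := toks.foldl
    (fun (st : Int × List Int) w => (st.1 + PySem.Str.len w, st.2 ++ [st.1 + PySem.Str.len w]))
    (0, [0])
  r.2.zip (PySem.List.slice r.2 (some 1) none)

-- Source B's while-loop as recursion; the two trailing drain loops are the nil cases
def mergeLoop (i j : Int) (gs ps : List (Int × Int)) : Int × Int × Int × List Int × List Int :=
  match gs, ps with
  | [], [] => (0, 0, 0, [], [])
  | [], _ :: ps' =>
      let r := mergeLoop i (j + 1) [] ps'
      (r.1, r.2.1 + 1, r.2.2.1, r.2.2.2.1, j :: r.2.2.2.2)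
  | _ :: gs', [] =>
      let r := mergeLoop (i + 1) j gs' []
      (r.1, r.2.1, r.2.2.1 + 1, i :: r.2.2.2.1, r.2.2.2.2)
  | g :: gs', p :: ps' =>
    if h : g = p then
      let cg := ((g :: gs').takeWhile (fun x => decide (x = g))).length
      let cp := ((p :: ps').takeWhile (fun x => decide (x = g))).length
      let gr := (g :: gs').dropWhile (fun x => decide (x = g))
      let pr := (p :: ps').dropWhile (fun x => decide (x = g))
      let r := mergeLoop (i + (cg : Int)) (j + (cp : Int)) gr pr
      (r.1 + (cg : Int), r.2.1, r.2.2.1, r.2.2.2.1, r.2.2.2.2)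
    else if pvLtB g p then
      let r := mergeLoop (i + 1) j gs' (p :: ps')
      (r.1, r.2.1, r.2.2.1 + 1, i :: r.2.2.2.1, r.2.2.2.2)
    else
      let r := mergeLoop i (j + 1) (g :: gs') ps'
      (r.1, r.2.1 + 1, r.2.2.1, r.2.2.2.1, j :: r.2.2.2.2)
  termination_by gs.length + ps.length
  decreasing_by
    all_goals first
      | (simp; omega)
      | (simp; done)
      | (rw [← h]
         have h1 := List.length_dropWhile_le (fun x => decide (x = g)) gs'
         have h2 := List.length_dropWhile_le (fun x => decide (x = g)) ps'
         simp at h1 h2 ⊢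
         omega)

def count_alt (gold_tok : List String) (pred_tok : List String) : Int × Int × Int × List Int × List Int :=
  mergeLoop 0 0 (spans_alt gold_tok) (spans_alt pred_tok)

-- ===== PRECONDITION & SPEC =====
def Spec_count (gold_tok : List String) (pred_tok : List String) (out : Int × Int × Int × List Int × List Int) : Prop := out = count_alt gold_tok pred_tok
instance (gold_tok : List String) (pred_tok : List String) (out : Int × Int × Int × List Int × List Int) : Decidable (Spec_count gold_tok pred_tok out) := by unfold Spec_count; infer_instance

-- ===== CLAIM (what is proved, stated in full; the proofs are below) =====
def Claim_equal_count : Prop := ∀ (gold_tok : List String) (pred_tok : List String), Dom_count gold_tok pred_tok → Spec_count gold_tok pred_tok (count gold_tok pred_tok)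

-- ===== LEMMAS AND PROOFS =====

-- lexicographic order on spans
def pvLe (a b : Int × Int) : Prop := a.1 < b.1 ∨ (a.1 = b.1 ∧ a.2 ≤ b.2)
def pvLt (a b : Int × Int) : Prop := a.1 < b.1 ∨ (a.1 = b.1 ∧ a.2 < b.2)

theorem pvLtB_iff (a b : Int × Int) : pvLtB a b = true ↔ pvLt a b := by
  simp [pvLtB, pvLt]

theorem pvLe_refl (a : Int × Int) : pvLe a a := by simp [pvLe]

theorem pvLt_of_le_ne {a b : Int × Int} (h : pvLe a b) (hne : a ≠ b) : pvLt a b := by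
  obtain ⟨a1, a2⟩ := a; obtain ⟨b1, b2⟩ := b
  simp [pvLe] at h; simp [pvLt]
  simp [Prod.ext_iff] at hne; omega

theorem pvLt_trans_le {a b c : Int × Int} (h : pvLt a b) (h2 : pvLe b c) : pvLt a c := by
  obtain ⟨a1, a2⟩ := a; obtain ⟨b1, b2⟩ := b; obtain ⟨c1, c2⟩ := c
  simp [pvLe] at h2; simp [pvLt] at h ⊢; omega

theorem pvLt_ne {a b : Int × Int} (h : pvLt a b) : b ≠ a := by
  obtain ⟨a1, a2⟩ := a; obtain ⟨b1, b2⟩ := b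
  simp [pvLt] at h; simp [Prod.ext_iff]; omega

theorem pvLt_flip {a b : Int × Int} (h : ¬ pvLt a b) (hne : a ≠ b) : pvLt b a := by
  obtain ⟨a1, a2⟩ := a; obtain ⟨b1, b2⟩ := b
  simp [pvLt] at h ⊢; simp [Prod.ext_iff] at hne; omega

-- abstract characterisation of both programs' result
def hits : List (Int × Int) → List (Int × Int) → Int
  | [], _ => 0
  | x :: t, ps => (if x ∈ ps then 1 else 0) + hits t ps

def missN : List (Int × Int) → List (Int × Int) → Int
  | [], _ => 0
  | x :: t, ps => (if x ∈ ps then 0 else 1) + missN t ps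

def misses (k : Int) : List (Int × Int) → List (Int × Int) → List Int
  | [], _ => []
  | x :: t, ps => if x ∈ ps then misses (k + 1) t ps else k :: misses (k + 1) t ps

def spansFrom (s : Int) : List String → List (Int × Int)
  | [] => []
  | w :: ws => (s, s + PySem.Str.len w) :: spansFrom (s + PySem.Str.len w) ws

def startsTail (s : Int) : List String → List Int
  | [] => []
  | w :: ws => (s + PySem.Str.len w) :: startsTail (s + PySem.Str.len w) ws

-- A's span builder
theorem text2spans_loop (ws : List String) (s : Int) (acc : List (Int × Int)) :
    (ws.foldl
      (fun (st : Int × List (Int × Int)) word =>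
        (st.1 + PySem.Str.len word, st.2 ++ [(st.1, st.1 + PySem.Str.len word)]))
      (s, acc)).2 = acc ++ spansFrom s ws := by
  induction ws generalizing s acc with
  | nil => simp [spansFrom]
  | cons w ws ih => simp only [List.foldl_cons, spansFrom]; rw [ih]; simp

theorem text2spans_eq (ws : List String) : text2spans ws = spansFrom 0 ws := by
  unfold text2spans; rw [text2spans_loop]; simp

-- B's span builder
theorem spans_alt_loop (ws : List String) (s : Int) (acc : List Int) :
    (ws.foldl
      (fun (st : Int × List Int) w => (st.1 + PySem.Str.len w, st.2 ++ [st.1 + PySem.Str.len w]))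
      (s, acc)).2 = acc ++ startsTail s ws := by
  induction ws generalizing s acc with
  | nil => simp [startsTail]
  | cons w ws ih => simp only [List.foldl_cons, startsTail]; rw [ih]; simp

theorem zip_startsTail (ws : List String) (s : Int) :
    (s :: startsTail s ws).zip (startsTail s ws) = spansFrom s ws := by
  induction ws generalizing s with
  | nil => simp [startsTail, spansFrom]
  | cons w ws ih => simp [startsTail, spansFrom, ih]

theorem spans_alt_eq (ws : List String) : spans_alt ws = spansFrom 0 ws := by
  have h := spans_alt_loop ws 0 [0]
  simp only [spans_alt, h]
  rw [PySem.List.slice_from_one]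
  exact zip_startsTail ws 0

theorem str_len_nonneg (w : String) : 0 ≤ PySem.Str.len w := by
  simp [PySem.Str.len_eq]

-- spans are lexicographically sorted, with s ≤ fst ≤ snd
theorem spansFrom_bounds (ws : List String) (s : Int) :
    ∀ x ∈ spansFrom s ws, (s ≤ x.1 ∧ x.1 ≤ x.2) := by
  induction ws generalizing s with
  | nil => simp [spansFrom]
  | cons w ws ih =>
    intro x hx
    have hl := str_len_nonneg w
    simp only [spansFrom, List.mem_cons] at hx
    rcases hx with h | h
    · subst h; simp
    · have := ih (s + PySem.Str.len w) x h; omega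

theorem spansFrom_sorted (ws : List String) (s : Int) :
    (spansFrom s ws).Pairwise pvLe := by
  induction ws generalizing s with
  | nil => simp [spansFrom]
  | cons w ws ih =>
    simp only [spansFrom, List.pairwise_cons]
    refine ⟨?_, ih _⟩
    intro x hx
    have hb := spansFrom_bounds ws (s + PySem.Str.len w) x hx
    have hl := str_len_nonneg w
    simp only [pvLe]
    omega

-- A's first loop
theorem loopA (ps : List (Int × Int)) (l : List (Int × Int)) (k t f : Int) (e : List Int)
    (he : ∀ x ∈ e, x < k) :
    (PySem.List.enumerate l k).foldl
      (fun (st : Int × Int × PySem.Set Int) gp =>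
        if gp.2 ∈ ps then (st.1 + 1, st.2.1, st.2.2)
        else (st.1, st.2.1 + 1, PySem.Set.add st.2.2 gp.1))
      (t, f, e)
      = (t + hits l ps, f + missN l ps, e ++ misses k l ps) := by
  induction l generalizing k t f e with
  | nil => simp [hits, missN, misses, PySem.List.enumerate_nil]
  | cons x l ih =>
    rw [PySem.List.enumerate_cons, List.foldl_cons]
    by_cases hx : x ∈ ps
    · have hstep : (if ((k, x) : Int × (Int × Int)).2 ∈ ps
            then ((t, f, e).1 + 1, (t, f, e).2.1, (t, f, e).2.2)
            else ((t, f, e).1, (t, f, e).2.1 + 1, PySem.Set.add (t, f, e).2.2 (k, x).1))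
          = ((t + 1 : Int), f, e) := by simp [hx]
      rw [hstep, ih (k + 1) (t + 1) f e (fun y hy => by have := he y hy; omega)]
      simp [hits, missN, misses, hx, Prod.ext_iff]
      omega
    · have hke : k ∉ e := fun hk => absurd (he k hk) (by omega)
      have hstep : (if ((k, x) : Int × (Int × Int)).2 ∈ ps
            then ((t, f, e).1 + 1, (t, f, e).2.1, (t, f, e).2.2)
            else ((t, f, e).1, (t, f, e).2.1 + 1, PySem.Set.add (t, f, e).2.2 (k, x).1))
          = (t, f + 1, e ++ [k]) := by
        simp [hx, PySem.Set.add_of_not_mem hke]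
      rw [hstep, ih (k + 1) t (f + 1) (e ++ [k])
        (fun y hy => by rcases List.mem_append.mp hy with h | h
                        · have := he y h; omega
                        · simp at h; omega)]
      simp [hits, missN, misses, hx, Prod.ext_iff]
      omega

-- A's second loop
theorem loopB (gs : List (Int × Int)) (l : List (Int × Int)) (k f : Int) (e : List Int)
    (he : ∀ x ∈ e, x < k) :
    (PySem.List.enumerate l k).foldl
      (fun (st : Int × PySem.Set Int) pp =>
        if pp.2 ∉ gs then (st.1 + 1, PySem.Set.add st.2 pp.1)
        else st)
      (f, e)
      = (f + missN l gs, e ++ misses k l gs) := by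
  induction l generalizing k f e with
  | nil => simp [missN, misses, PySem.List.enumerate_nil]
  | cons x l ih =>
    rw [PySem.List.enumerate_cons, List.foldl_cons]
    by_cases hx : x ∈ gs
    · have hstep : (if ((k, x) : Int × (Int × Int)).2 ∉ gs
            then ((f, e).1 + 1, PySem.Set.add (f, e).2 (k, x).1)
            else (f, e)) = ((f : Int), e) := by simp [hx]
      rw [hstep, ih (k + 1) f e (fun y hy => by have := he y hy; omega)]
      simp [missN, misses, hx]
    · have hke : k ∉ e := fun hk => absurd (he k hk) (by omega)
      have hstep : (if ((k, x) : Int × (Int × Int)).2 ∉ gs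
            then ((f, e).1 + 1, PySem.Set.add (f, e).2 (k, x).1)
            else (f, e)) = (f + 1, e ++ [k]) := by
        simp [hx, PySem.Set.add_of_not_mem hke]
      rw [hstep, ih (k + 1) (f + 1) (e ++ [k])
        (fun y hy => by rcases List.mem_append.mp hy with h | h
                        · have := he y h; omega
                        · simp at h; omega)]
      simp [missN, misses, hx, Prod.ext_iff]
      omega

theorem count_eq (gold_tok pred_tok : List String) :
    count gold_tok pred_tok =
      (hits (spansFrom 0 gold_tok) (spansFrom 0 pred_tok),
       missN (spansFrom 0 pred_tok) (spansFrom 0 gold_tok),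
       missN (spansFrom 0 gold_tok) (spansFrom 0 pred_tok),
       misses 0 (spansFrom 0 gold_tok) (spansFrom 0 pred_tok),
       misses 0 (spansFrom 0 pred_tok) (spansFrom 0 gold_tok)) := by
  unfold count
  dsimp only
  rw [text2spans_eq, text2spans_eq]
  rw [loopA (spansFrom 0 pred_tok) (spansFrom 0 gold_tok) 0 0 0 PySem.Set.empty (by simp [PySem.Set.empty]),
      loopB (spansFrom 0 gold_tok) (spansFrom 0 pred_tok) 0 0 PySem.Set.empty (by simp [PySem.Set.empty])]
  simp

-- additivity / congruence of the characterisation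
theorem hits_append (a b ps : List (Int × Int)) : hits (a ++ b) ps = hits a ps + hits b ps := by
  induction a with
  | nil => simp [hits]
  | cons x t ih => simp [hits, ih]; ring

theorem missN_append (a b ps : List (Int × Int)) : missN (a ++ b) ps = missN a ps + missN b ps := by
  induction a with
  | nil => simp [missN]
  | cons x t ih => simp [missN, ih]; ring

theorem misses_append (a b ps : List (Int × Int)) (k : Int) :
    misses k (a ++ b) ps = misses k a ps ++ misses (k + (a.length : Int)) b ps := by
  induction a generalizing k with
  | nil => simp [misses]
  | cons x t ih =>
    simp only [List.cons_append, misses, ih, List.length_cons]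
    have : k + 1 + (t.length : Int) = k + ((t.length : Int) + 1) := by ring
    rw [this]
    split <;> simp

theorem hits_congr {l ps qs : List (Int × Int)} (h : ∀ x ∈ l, (x ∈ ps ↔ x ∈ qs)) :
    hits l ps = hits l qs := by
  induction l with
  | nil => rfl
  | cons x t ih =>
    simp only [hits]
    rw [ih (fun y hy => h y (by simp [hy]))]
    have := h x (by simp)
    by_cases hx : x ∈ ps
    · rw [if_pos hx, if_pos (this.mp hx)]
    · rw [if_neg hx, if_neg (fun hq => hx (this.mpr hq))]

theorem missN_congr {l ps qs : List (Int × Int)} (h : ∀ x ∈ l, (x ∈ ps ↔ x ∈ qs)) :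
    missN l ps = missN l qs := by
  induction l with
  | nil => rfl
  | cons x t ih =>
    simp only [missN]
    rw [ih (fun y hy => h y (by simp [hy]))]
    have := h x (by simp)
    by_cases hx : x ∈ ps
    · rw [if_pos hx, if_pos (this.mp hx)]
    · rw [if_neg hx, if_neg (fun hq => hx (this.mpr hq))]

theorem misses_congr {l ps qs : List (Int × Int)} (k : Int) (h : ∀ x ∈ l, (x ∈ ps ↔ x ∈ qs)) :
    misses k l ps = misses k l qs := by
  induction l generalizing k with
  | nil => rfl
  | cons x t ih =>
    simp only [misses]
    rw [ih (k + 1) (fun y hy => h y (by simp [hy]))]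
    have := h x (by simp)
    by_cases hx : x ∈ ps
    · rw [if_pos hx, if_pos (this.mp hx)]
    · rw [if_neg hx, if_neg (fun hq => hx (this.mpr hq))]

theorem hits_all_mem {l ps : List (Int × Int)} (h : ∀ x ∈ l, x ∈ ps) :
    hits l ps = (l.length : Int) := by
  induction l with
  | nil => rfl
  | cons x t ih =>
    simp only [hits, if_pos (h x (by simp)), List.length_cons]
    rw [ih (fun y hy => h y (by simp [hy]))]
    push_cast; ring

theorem missN_all_mem {l ps : List (Int × Int)} (h : ∀ x ∈ l, x ∈ ps) :
    missN l ps = 0 := by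
  induction l with
  | nil => rfl
  | cons x t ih =>
    simp only [missN, if_pos (h x (by simp))]
    rw [ih (fun y hy => h y (by simp [hy]))]
    norm_num

theorem misses_all_mem {l ps : List (Int × Int)} (k : Int) (h : ∀ x ∈ l, x ∈ ps) :
    misses k l ps = [] := by
  induction l generalizing k with
  | nil => rfl
  | cons x t ih =>
    simp only [misses, if_pos (h x (by simp))]
    exact ih (k + 1) (fun y hy => h y (by simp [hy]))

-- everything after the dropped run is strictly greater
theorem dropWhile_gt {l : List (Int × Int)} {g : Int × Int}
    (hs : l.Pairwise pvLe) (hall : ∀ y ∈ l, pvLe g y) :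
    ∀ x ∈ l.dropWhile (fun y => decide (y = g)), pvLt g x := by
  induction l with
  | nil => simp
  | cons y t ih =>
    simp only [List.pairwise_cons] at hs
    by_cases hy : y = g
    · rw [List.dropWhile_cons_of_pos (by simp [hy])]
      exact ih hs.2 (fun z hz => hall z (by simp [hz]))
    · rw [List.dropWhile_cons_of_neg (by simp [hy])]
      intro x hx
      have hgy : pvLt g y := pvLt_of_le_ne (hall y (by simp)) (fun h => hy h.symm)
      simp only [List.mem_cons] at hx
      rcases hx with rfl | hx
      · exact hgy
      · exact pvLt_trans_le hgy (hs.1 x hx)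

theorem takeWhile_eq {l : List (Int × Int)} {g : Int × Int} :
    ∀ x ∈ l.takeWhile (fun y => decide (y = g)), x = g := by
  intro x hx
  have := List.mem_takeWhile_imp hx
  simpa using this

-- the main merge lemma
theorem merge_spec (n : Nat) : ∀ (gs ps : List (Int × Int)) (i j : Int),
    gs.length + ps.length ≤ n → gs.Pairwise pvLe → ps.Pairwise pvLe →
    mergeLoop i j gs ps =
      (hits gs ps, missN ps gs, missN gs ps, misses i gs ps, misses j ps gs) := by
  induction n with
  | zero =>
    intro gs ps i j hn _ _
    have hgs : gs = [] := by cases gs <;> simp_all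
    have hps : ps = [] := by cases ps <;> simp_all
    subst hgs; subst hps
    simp [mergeLoop, hits, missN, misses]
  | succ n ih =>
    intro gs ps i j hn hg hp
    match gs, ps with
    | [], [] => simp [mergeLoop, hits, missN, misses]
    | [], p :: ps' =>
      rw [mergeLoop]
      rw [ih [] ps' i (j + 1) (by simp at hn ⊢; omega) (by simp)
        (hp.sublist (List.sublist_cons_self p ps'))]
      simp [hits, missN, misses, Prod.ext_iff]
      omega
    | g :: gs', [] =>
      rw [mergeLoop]
      rw [ih gs' [] (i + 1) j (by simp at hn ⊢; omega)
        (hg.sublist (List.sublist_cons_self g gs')) (by simp)]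
      simp [hits, missN, misses, Prod.ext_iff]
      omega
    | g :: gs', p :: ps' =>
      rw [mergeLoop]
      by_cases h : g = p
      · rw [dif_pos h]
        subst h
        dsimp only
        -- run of spans equal to g at the head of both lists
        have hallg : ∀ y ∈ g :: gs', pvLe g y := by
          intro y hy
          rcases List.mem_cons.mp hy with rfl | hy
          · exact pvLe_refl y
          · exact (List.pairwise_cons.mp hg).1 y hy
        have hallp : ∀ y ∈ g :: ps', pvLe g y := by
          intro y hy
          rcases List.mem_cons.mp hy with rfl | hy
          · exact pvLe_refl y
          · exact (List.pairwise_cons.mp hp).1 y hy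
        have hGgt : ∀ x ∈ (g :: gs').dropWhile (fun y => decide (y = g)), pvLt g x :=
          dropWhile_gt hg hallg
        have hPgt : ∀ x ∈ (g :: ps').dropWhile (fun y => decide (y = g)), pvLt g x :=
          dropWhile_gt hp hallp
        have hsplitG := (List.takeWhile_append_dropWhile
          (p := fun y => decide (y = g)) (l := g :: gs'))
        have hsplitP := (List.takeWhile_append_dropWhile
          (p := fun y => decide (y = g)) (l := g :: ps'))
        have memG : ∀ x : Int × Int, pvLt g x →
            (x ∈ g :: gs' ↔ x ∈ (g :: gs').dropWhile (fun y => decide (y = g))) := by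
          intro x hx
          conv_lhs => rw [← hsplitG]
          rw [List.mem_append]
          constructor
          · rintro (hm | hm)
            · exact absurd (takeWhile_eq x hm) (pvLt_ne hx)
            · exact hm
          · exact fun hm => Or.inr hm
        have memP : ∀ x : Int × Int, pvLt g x →
            (x ∈ g :: ps' ↔ x ∈ (g :: ps').dropWhile (fun y => decide (y = g))) := by
          intro x hx
          conv_lhs => rw [← hsplitP]
          rw [List.mem_append]
          constructor
          · rintro (hm | hm)
            · exact absurd (takeWhile_eq x hm) (pvLt_ne hx)
            · exact hm
          · exact fun hm => Or.inr hm
        have hlen : ((g :: gs').dropWhile (fun y => decide (y = g))).length +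
            ((g :: ps').dropWhile (fun y => decide (y = g))).length ≤ n := by
          have e1 : (g :: gs').dropWhile (fun y => decide (y = g)) =
              gs'.dropWhile (fun y => decide (y = g)) := by
            rw [List.dropWhile_cons_of_pos (by simp)]
          have e2 : (g :: ps').dropWhile (fun y => decide (y = g)) =
              ps'.dropWhile (fun y => decide (y = g)) := by
            rw [List.dropWhile_cons_of_pos (by simp)]
          rw [e1, e2]
          have h1 := List.length_dropWhile_le (fun y => decide (y = g)) gs'
          have h2 := List.length_dropWhile_le (fun y => decide (y = g)) ps'
          simp at hn
          omega
        rw [ih _ _ _ _ hlen (hg.sublist (List.dropWhile_sublist _))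
          (hp.sublist (List.dropWhile_sublist _))]
        -- now compare the five components
        have cTP : hits (g :: gs') (g :: ps') =
            hits ((g :: gs').dropWhile (fun y => decide (y = g)))
                 ((g :: ps').dropWhile (fun y => decide (y = g))) +
            (((g :: gs').takeWhile (fun y => decide (y = g))).length : Int) := by
          conv_lhs => rw [← hsplitG]
          rw [hits_append,
            hits_all_mem (l := (g :: gs').takeWhile (fun y => decide (y = g)))
              (fun x hx => by rw [takeWhile_eq x hx]; exact List.mem_cons_self),
            hits_congr (fun x hx => memP x (hGgt x hx))]
          ring
        have cFP : missN (g :: ps') (g :: gs') =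
            missN ((g :: ps').dropWhile (fun y => decide (y = g)))
                  ((g :: gs').dropWhile (fun y => decide (y = g))) := by
          conv_lhs => rw [← hsplitP]
          rw [missN_append,
            missN_all_mem (l := (g :: ps').takeWhile (fun y => decide (y = g)))
              (fun x hx => by rw [takeWhile_eq x hx]; exact List.mem_cons_self),
            missN_congr (fun x hx => memG x (hPgt x hx))]
          ring
        have cFN : missN (g :: gs') (g :: ps') =
            missN ((g :: gs').dropWhile (fun y => decide (y = g)))
                  ((g :: ps').dropWhile (fun y => decide (y = g))) := by
          conv_lhs => rw [← hsplitG]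
          rw [missN_append,
            missN_all_mem (l := (g :: gs').takeWhile (fun y => decide (y = g)))
              (fun x hx => by rw [takeWhile_eq x hx]; exact List.mem_cons_self),
            missN_congr (fun x hx => memP x (hGgt x hx))]
          ring
        have cEG : misses i (g :: gs') (g :: ps') =
            misses (i + (((g :: gs').takeWhile (fun y => decide (y = g))).length : Int))
                   ((g :: gs').dropWhile (fun y => decide (y = g)))
                   ((g :: ps').dropWhile (fun y => decide (y = g))) := by
          conv_lhs => rw [← hsplitG]
          rw [misses_append,
            misses_all_mem (l := (g :: gs').takeWhile (fun y => decide (y = g))) i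
              (fun x hx => by rw [takeWhile_eq x hx]; exact List.mem_cons_self),
            misses_congr _ (fun x hx => memP x (hGgt x hx))]
          simp
        have cEP : misses j (g :: ps') (g :: gs') =
            misses (j + (((g :: ps').takeWhile (fun y => decide (y = g))).length : Int))
                   ((g :: ps').dropWhile (fun y => decide (y = g)))
                   ((g :: gs').dropWhile (fun y => decide (y = g))) := by
          conv_lhs => rw [← hsplitP]
          rw [misses_append,
            misses_all_mem (l := (g :: ps').takeWhile (fun y => decide (y = g))) j
              (fun x hx => by rw [takeWhile_eq x hx]; exact List.mem_cons_self),
            misses_congr _ (fun x hx => memG x (hPgt x hx))]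
          simp
        rw [cTP, cFP, cFN, cEG, cEP]
      · rw [dif_neg h]
        by_cases h2 : pvLtB g p = true
        · rw [if_pos h2]
          dsimp only
          have hlt : pvLt g p := (pvLtB_iff g p).mp h2
          have hgy : ∀ y ∈ p :: ps', pvLt g y := by
            intro y hy
            rcases List.mem_cons.mp hy with rfl | hy
            · exact hlt
            · exact pvLt_trans_le hlt ((List.pairwise_cons.mp hp).1 y hy)
          have hgnot : g ∉ p :: ps' := fun hm => (pvLt_ne (hgy g hm)) rfl
          rw [ih gs' (p :: ps') (i + 1) j (by simp only [List.length_cons] at hn ⊢; omega)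
            (hg.sublist (List.sublist_cons_self g gs')) hp]
          have hmemiff : ∀ y ∈ p :: ps', (y ∈ g :: gs' ↔ y ∈ gs') := by
            intro y hy
            have hne : y ≠ g := pvLt_ne (hgy y hy)
            simp [List.mem_cons, hne]
          have cFP : missN (p :: ps') (g :: gs') = missN (p :: ps') gs' :=
            missN_congr hmemiff
          have cEP : misses j (p :: ps') (g :: gs') = misses j (p :: ps') gs' :=
            misses_congr j hmemiff
          rw [cFP, cEP]
          simp only [hits, missN, misses, if_neg hgnot, Prod.ext_iff]
          and_intros <;> first | rfl | omega | trivial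
        · rw [if_neg h2]
          dsimp only
          have hlt : pvLt p g := pvLt_flip (fun hl => h2 ((pvLtB_iff g p).mpr hl)) h
          have hpy : ∀ y ∈ g :: gs', pvLt p y := by
            intro y hy
            rcases List.mem_cons.mp hy with rfl | hy
            · exact hlt
            · exact pvLt_trans_le hlt ((List.pairwise_cons.mp hg).1 y hy)
          have hpnot : p ∉ g :: gs' := fun hm => (pvLt_ne (hpy p hm)) rfl
          rw [ih (g :: gs') ps' i (j + 1) (by simp only [List.length_cons] at hn ⊢; omega) hg
            (hp.sublist (List.sublist_cons_self p ps'))]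
          have hmemiff : ∀ y ∈ g :: gs', (y ∈ p :: ps' ↔ y ∈ ps') := by
            intro y hy
            have hne : y ≠ p := pvLt_ne (hpy y hy)
            simp [List.mem_cons, hne]
          have cTP : hits (g :: gs') (p :: ps') = hits (g :: gs') ps' :=
            hits_congr hmemiff
          have cFN : missN (g :: gs') (p :: ps') = missN (g :: gs') ps' :=
            missN_congr hmemiff
          have cEG : misses i (g :: gs') (p :: ps') = misses i (g :: gs') ps' :=
            misses_congr i hmemiff
          rw [cTP, cFN, cEG]
          simp only [hits, missN, misses, if_neg hpnot, Prod.ext_iff]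
          and_intros <;> first | rfl | omega | trivial

theorem count_alt_eq (gold_tok pred_tok : List String) :
    count_alt gold_tok pred_tok =
      (hits (spansFrom 0 gold_tok) (spansFrom 0 pred_tok),
       missN (spansFrom 0 pred_tok) (spansFrom 0 gold_tok),
       missN (spansFrom 0 gold_tok) (spansFrom 0 pred_tok),
       misses 0 (spansFrom 0 gold_tok) (spansFrom 0 pred_tok),
       misses 0 (spansFrom 0 pred_tok) (spansFrom 0 gold_tok)) := by
  unfold count_alt
  rw [spans_alt_eq, spans_alt_eq]
  exact merge_spec ((spansFrom 0 gold_tok).length + (spansFrom 0 pred_tok).length)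
    _ _ 0 0 le_rfl (spansFrom_sorted _ _) (spansFrom_sorted _ _)

-- ===== VERDICT (by name: the statement is the Claim_ definition above) =====
theorem count_spec : Claim_equal_count := by
  intro gold_tok pred_tok _
  unfold Spec_count
  rw [count_eq, count_alt_eq]
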